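-- pv_equiv track=rewrite | github.com/liupengsay/Algorithm | algorithm/src/dp/bag_dp.py | bin_split
-- ===== SOURCE A (Python) =====
-- def bin_split(num):
--     assert num > 0
--     # 二进制拆分
--     lst = []
--     m = 1
--     while num:
--         if num % 2:
--             lst.append(m)
--         m *= 2
--         num //= 2
--     return lst
-- ===== SOURCE B (Python) =====
-- def bin_split(num):
--     assert num > 0
--     # lowest-set-bit extraction: iterate once per set bit
--     lst = []
--     while num:
--         keep = num & (num - 1)
--         lst.append(num - keep)
--         num = keep
--     return lst
-- ===== Notes on version B (the rewrite author's own statement) =====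
-- stated objective: alternative
-- what changed: Replaces the per-bit-position scan (running power m, num%2 test, num//=2) with lowest-set-bit extraction via num&(num-1), iterating only once per set bit and maintaining no power variable.
import Mathlib
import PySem

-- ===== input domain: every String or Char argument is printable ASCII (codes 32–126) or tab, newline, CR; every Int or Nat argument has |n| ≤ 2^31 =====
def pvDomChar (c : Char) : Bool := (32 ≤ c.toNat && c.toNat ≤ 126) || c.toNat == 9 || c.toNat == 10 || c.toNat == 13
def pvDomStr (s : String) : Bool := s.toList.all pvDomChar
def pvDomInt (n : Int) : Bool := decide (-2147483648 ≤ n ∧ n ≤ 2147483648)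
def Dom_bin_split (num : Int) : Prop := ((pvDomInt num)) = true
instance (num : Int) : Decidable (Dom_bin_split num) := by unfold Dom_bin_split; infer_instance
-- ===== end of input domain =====

-- B replaces A's per-bit-position scan by lowest-set-bit extraction (num & (num-1));
-- equivalence of the RETURN value is proved for num > 0 (A asserts num > 0).

-- ===== PORT A =====
-- A's while-loop over num; since Pre_ gives num > 0, Python's `num % 2` and
-- `num //= 2` coincide with Nat `% 2` and `/ 2` on num.toNat (exact on num > 0).
def binSplitLoopA (n : Nat) (m : Int) : List Int :=
  if n = 0 then []
  else (if n % 2 = 1 then [m] else []) ++ binSplitLoopA (n / 2) (2 * m)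
decreasing_by exact Nat.div_lt_self (Nat.pos_of_ne_zero (by assumption)) (by omega)

def bin_split (num : Int) : List Int := binSplitLoopA num.toNat 1

-- ===== PORT B =====
-- B's while-loop: keep = num & (num - 1); append num - keep; num = keep.
def binSplitLoopB (n : Nat) : List Int :=
  if _h : n = 0 then []
  else
    let keep := n &&& (n - 1)
    ((n : Int) - (keep : Int)) :: binSplitLoopB keep
decreasing_by
  exact Nat.lt_of_le_of_lt Nat.and_le_right (by omega)

def bin_split_alt (num : Int) : List Int := binSplitLoopB num.toNat

-- ===== PRECONDITION & SPEC =====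
-- Python A asserts num > 0 (AssertionError otherwise), so exactly num > 0 is admitted.
def Pre_bin_split (num : Int) : Prop := 0 < num
instance (num : Int) : Decidable (Pre_bin_split num) := by unfold Pre_bin_split; infer_instance
def pvWitness_bin_split : Int := (52)

def Spec_bin_split (num : Int) (out : List Int) : Prop := out = bin_split_alt num
instance (num : Int) (out : List Int) : Decidable (Spec_bin_split num out) := by unfold Spec_bin_split; infer_instance

-- ===== CLAIM (what is proved, stated in full; the proofs are below) =====
def Claim_equal_bin_split : Prop := ∀ (num : Int), Dom_bin_split num → Pre_bin_split num → Spec_bin_split num (bin_split num)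

-- ===== LEMMAS AND PROOFS =====

-- recurrence for Nat.land: bit 0 plus the land of the halves
theorem land_rec (a b : Nat) :
    a &&& b = 2 * (a / 2 &&& b / 2) + (if a % 2 = 1 ∧ b % 2 = 1 then 1 else 0) := by
  rcases eq_or_ne a 0 with rfl | ha
  · simp
  rcases eq_or_ne b 0 with rfl | hb
  · simp
  have h : a &&& b = Nat.bit (Nat.bodd a && Nat.bodd b) (a / 2 &&& b / 2) :=
    Nat.bitwise_of_ne_zero ha hb
  have h1 := Nat.mod_two_of_bodd a
  have h2 := Nat.mod_two_of_bodd b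
  rw [h, Nat.bit]
  cases hba : Nat.bodd a <;> cases hbb : Nat.bodd b <;>
    simp [hba, hbb] at h1 h2 ⊢ <;> omega

theorem land_pred_odd (n : Nat) (h : n % 2 = 1) : n &&& (n - 1) = n - 1 := by
  rw [land_rec]
  have h1 : (n - 1) % 2 = 0 := by omega
  have h2 : (n - 1) / 2 = n / 2 := by omega
  rw [h2]
  simp [Nat.and_self, h1]
  omega

theorem land_pred_even (x : Nat) :
    (2 * x) &&& (2 * x - 1) = 2 * (x &&& (x - 1)) := by
  rw [land_rec]
  have h1 : (2 * x) % 2 = 0 := by omega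
  have h2 : (2 * x) / 2 = x := by omega
  have h3 : (2 * x - 1) / 2 = x - 1 := by omega
  simp [h1, h2, h3]

theorem loopB_double (x : Nat) :
    binSplitLoopB (2 * x) = (binSplitLoopB x).map (fun v => 2 * v) := by
  induction x using Nat.strong_induction_on with
  | _ x ih =>
    rcases eq_or_ne x 0 with rfl | hx
    · simp [binSplitLoopB]
    have h2x : 2 * x ≠ 0 := by omega
    rw [binSplitLoopB, binSplitLoopB]
    simp only [hx, h2x, dif_neg, not_false_iff]
    rw [land_pred_even x]
    have hk : x &&& (x - 1) < x :=
      Nat.lt_of_le_of_lt Nat.and_le_right (by omega)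
    rw [ih _ hk]
    simp only [List.map_cons]
    congr 1
    push_cast
    ring

theorem loopA_eq (n : Nat) (m : Int) :
    binSplitLoopA n m = (binSplitLoopB n).map (fun v => m * v) := by
  induction n using Nat.strong_induction_on generalizing m with
  | _ n ih =>
    rcases eq_or_ne n 0 with rfl | hn
    · simp [binSplitLoopA, binSplitLoopB]
    have hdiv : n / 2 < n := Nat.div_lt_self (Nat.pos_of_ne_zero hn) (by omega)
    rw [binSplitLoopA]
    simp only [hn, if_neg, not_false_iff]
    rw [ih _ hdiv]
    rcases Nat.mod_two_eq_zero_or_one n with hpar | hpar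
    · -- even case: loopB n = map (2*.) (loopB (n/2))
      have hn2 : n = 2 * (n / 2) := by omega
      rw [hpar]
      simp only [if_neg (by omega : ¬ (0:Nat) = 1)]
      conv_rhs => rw [hn2, loopB_double]
      simp only [List.map_map, List.nil_append]
      apply List.map_congr_left
      intro v _
      simp [Function.comp]
      ring
    · -- odd case: loopB n = 1 :: map (2*.) (loopB (n/2))
      have hkeep : n &&& (n - 1) = n - 1 := land_pred_odd n hpar
      have hn1 : n - 1 = 2 * (n / 2) := by omega
      conv_rhs => rw [binSplitLoopB]
      simp only [hn, dif_neg, not_false_iff]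
      rw [hkeep, hn1, loopB_double]
      have hhead : (n : Int) - ((2 * (n / 2) : Nat) : Int) = 1 := by
        push_cast; omega
      rw [hpar, if_pos rfl, hhead]
      simp only [List.map_cons, List.map_map, List.singleton_append, mul_one]
      congr 1
      apply List.map_congr_left
      intro v _
      simp [Function.comp]
      ring

-- ===== VERDICT (by name: the statement is the Claim_ definition above) =====
theorem bin_split_spec : Claim_equal_bin_split := by
  intro num _ _
  unfold Spec_bin_split bin_split bin_split_alt
  rw [loopA_eq]
  simp
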